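-- pv_equiv track=rewrite | github.com/pkuchmiichuk/ua-coref | scripts/utils.py | find_slice_ids
-- ===== SOURCE A (Python) =====
-- from itertools import groupby
--
-- def find_slice_ids(sent_ids):
--     sentence_lengths = [len(list(g)) for k, g in groupby(sent_ids)]
--     slice_ids = []
--     start = 0
--     end = 0
--     for length in sentence_lengths:
--         end += length
--         slice_ids.append((start, end))
--         start = end
--
--     return slice_ids
-- ===== SOURCE B (Python) =====
-- def find_slice_ids(sent_ids):
--     # One pass with enumerate: emit a slice each time the value changes,
--     # plus the trailing run after the loop (nothing for empty input).
--     slice_ids = []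
--     start = 0
--     prev = None
--     for i, v in enumerate(sent_ids):
--         if i > 0 and v != prev:
--             slice_ids.append((start, i))
--             start = i
--         prev = v
--     if sent_ids:
--         slice_ids.append((start, len(sent_ids)))
--     return slice_ids
-- ===== Notes on version B (the rewrite author's own statement) =====
-- stated objective: simpler
-- what changed: Replaces groupby plus an intermediate run-lengths list and a second summing loop by a single fused pass over enumerate(sent_ids) that emits a slice at each change point and appends the trailing run.
import Mathlib
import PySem

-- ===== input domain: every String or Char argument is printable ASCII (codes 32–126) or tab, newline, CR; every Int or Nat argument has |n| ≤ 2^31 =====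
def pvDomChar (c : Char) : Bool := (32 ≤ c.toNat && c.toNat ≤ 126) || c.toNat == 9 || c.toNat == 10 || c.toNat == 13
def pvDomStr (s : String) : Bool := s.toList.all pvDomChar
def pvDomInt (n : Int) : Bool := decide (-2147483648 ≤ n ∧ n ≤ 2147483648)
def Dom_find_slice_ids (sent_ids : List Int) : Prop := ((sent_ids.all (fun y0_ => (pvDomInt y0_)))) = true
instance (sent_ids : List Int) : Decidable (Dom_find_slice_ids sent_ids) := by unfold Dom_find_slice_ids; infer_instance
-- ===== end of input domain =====

-- B replaces groupby + an intermediate run-lengths list + a second summing loop by one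
-- fused pass over enumerate that emits a slice at each change point (objective: simpler).

-- ===== PORT A =====
-- itertools.groupby run lengths: length of each maximal run of equal adjacent elements
def pvGroupLens : List Int → List Nat
  | [] => []
  | x :: xs =>
      (1 + (xs.takeWhile (· == x)).length) :: pvGroupLens (xs.dropWhile (· == x))
termination_by l => l.length
decreasing_by
  have := List.length_dropWhile_le (fun y => y == x) xs
  simp; omega

def find_slice_ids (sent_ids : List Int) : List (Int × Int) :=
  let sentence_lengths := pvGroupLens sent_ids
  let st := sentence_lengths.foldl
    (fun (st : List (Int × Int) × Int × Int) (length : Nat) =>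
      let slice_ids := st.1
      let start := st.2.1
      let «end» := st.2.2 + (length : Int)
      (slice_ids ++ [(start, «end»)], «end», «end»)) ([], 0, 0)
  st.1

-- ===== PORT B =====
def find_slice_ids_alt (sent_ids : List Int) : List (Int × Int) :=
  let st := (PySem.List.enumerate sent_ids).foldl
    (fun (st : List (Int × Int) × Int × Option Int) (iv : Int × Int) =>
      let i := iv.1
      let v := iv.2
      if i > 0 ∧ some v ≠ st.2.2 then
        (st.1 ++ [(st.2.1, i)], i, some v)
      else
        (st.1, st.2.1, some v)) ([], 0, none)
  if sent_ids ≠ [] then st.1 ++ [(st.2.1, (sent_ids.length : Int))] else st.1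

-- ===== PRECONDITION & SPEC =====
def Spec_find_slice_ids (sent_ids : List Int) (out : List (Int × Int)) : Prop := out = find_slice_ids_alt sent_ids
instance (sent_ids : List Int) (out : List (Int × Int)) : Decidable (Spec_find_slice_ids sent_ids out) := by unfold Spec_find_slice_ids; infer_instance

-- ===== CLAIM (what is proved, stated in full; the proofs are below) =====
def Claim_equal_find_slice_ids : Prop := ∀ (sent_ids : List Int), Dom_find_slice_ids sent_ids → Spec_find_slice_ids sent_ids (find_slice_ids sent_ids)

-- ===== LEMMAS AND PROOFS =====

-- common spec: index-based run slices starting at offset s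
def pvRuns : List Int → Int → List (Int × Int)
  | [], _ => []
  | x :: xs, s =>
      (s, s + (1 + ((xs.takeWhile (· == x)).length : Int))) ::
        pvRuns (xs.dropWhile (· == x)) (s + (1 + ((xs.takeWhile (· == x)).length : Int)))
termination_by l _ => l.length
decreasing_by
  have := List.length_dropWhile_le (fun y => y == x) xs
  simp; omega

theorem pvRuns_nil (s : Int) : pvRuns [] s = [] := by simp [pvRuns]

theorem pvRuns_cons (x : Int) (xs : List Int) (s : Int) :
    pvRuns (x :: xs) s = (s, s + (1 + ((xs.takeWhile (· == x)).length : Int))) ::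
      pvRuns (xs.dropWhile (· == x)) (s + (1 + ((xs.takeWhile (· == x)).length : Int))) := by
  rw [pvRuns]

-- A's loop body / B's loop body as named functions
def pvFA := fun (st : List (Int × Int) × Int × Int) (length : Nat) =>
  let slice_ids := st.1
  let start := st.2.1
  let «end» := st.2.2 + (length : Int)
  (slice_ids ++ [(start, «end»)], «end», «end»)

def pvFB := fun (st : List (Int × Int) × Int × Option Int) (iv : Int × Int) =>
  if iv.1 > 0 ∧ some iv.2 ≠ st.2.2 then
    (st.1 ++ [(st.2.1, iv.1)], iv.1, some iv.2)
  else
    (st.1, st.2.1, some iv.2)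

def pvGoA : List Nat → Int → List (Int × Int)
  | [], _ => []
  | l :: ls, e => (e, e + (l : Int)) :: pvGoA ls (e + (l : Int))

theorem pvFA_foldl (lens : List Nat) (acc : List (Int × Int)) (e : Int) :
    lens.foldl pvFA (acc, e, e) = (acc ++ pvGoA lens e, e + ((lens.sum : Nat) : Int), e + ((lens.sum : Nat) : Int)) := by
  induction lens generalizing acc e with
  | nil => simp [pvGoA]
  | cons l ls ih =>
      simp only [List.foldl_cons, pvFA, pvGoA]
      rw [ih]
      simp [List.append_assoc, add_assoc]

theorem pvGoA_groupLens (xs : List Int) (s : Int) : pvGoA (pvGroupLens xs) s = pvRuns xs s := by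
  induction xs using pvGroupLens.induct generalizing s with
  | case1 => simp [pvGroupLens, pvGoA, pvRuns_nil]
  | case2 x xs ih =>
      rw [pvGroupLens, pvRuns_cons, pvGoA]
      rw [ih]
      push_cast
      ring_nf

theorem pvA_eq_runs (xs : List Int) : find_slice_ids xs = pvRuns xs 0 := by
  show (List.foldl pvFA ([], 0, 0) (pvGroupLens xs)).1 = pvRuns xs 0
  rw [pvFA_foldl]
  simp [pvGoA_groupLens]

-- B's fold over the enumerated suffix, with 0 < i maintained
theorem pvFB_foldl (ys : List Int) : ∀ (p : Int) (i : Int) (acc : List (Int × Int)) (start : Int),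
    0 < i →
    (let st := (PySem.List.enumerate ys i).foldl pvFB (acc, start, some p)
     st.1 ++ [(st.2.1, i + (ys.length : Int))]) =
      acc ++ (start, i + ((ys.takeWhile (· == p)).length : Int)) ::
        pvRuns (ys.dropWhile (· == p)) (i + ((ys.takeWhile (· == p)).length : Int)) := by
  induction ys with
  | nil =>
      intro p i acc start hi
      simp [PySem.List.enumerate_nil, pvRuns_nil]
  | cons y ys ih =>
      intro p i acc start hi
      rw [PySem.List.enumerate_cons]
      simp only [List.foldl_cons]
      by_cases hyp : y = p
      · subst hyp
        have hstep : pvFB (acc, start, some y) (i, y) = (acc, start, some y) := by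
          simp [pvFB]
        rw [hstep]
        have hrec := ih y (i + 1) acc start (by omega)
        simp only at hrec
        have hl : i + (((y :: ys).length : Nat) : Int) = i + 1 + (ys.length : Int) := by
          rw [List.length_cons]; push_cast; ring
        rw [hl, hrec]
        have ht : List.takeWhile (fun x => x == y) (y :: ys) = y :: List.takeWhile (fun x => x == y) ys := by
          simp
        rw [ht]
        have hd : List.dropWhile (fun x => x == y) (y :: ys) = List.dropWhile (fun x => x == y) ys := by
          simp
        rw [hd]
        push_cast [List.length_cons]
        ring_nf
      · have hstep : pvFB (acc, start, some p) (i, y) = (acc ++ [(start, i)], i, some y) := by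
          simp only [pvFB]
          rw [if_pos ⟨hi, by simpa using hyp⟩]
        rw [hstep]
        have hrec := ih y (i + 1) (acc ++ [(start, i)]) i (by omega)
        simp only at hrec
        have hl : i + (((y :: ys).length : Nat) : Int) = i + 1 + (ys.length : Int) := by
          rw [List.length_cons]; push_cast; ring
        rw [hl, hrec]
        have hb : (y == p) = false := by simp [hyp]
        have ht : List.takeWhile (fun x => x == p) (y :: ys) = ([] : List Int) := by
          simp [hb]
        rw [ht]
        have hd : List.dropWhile (fun x => x == p) (y :: ys) = y :: ys := by
          simp [hb]
        rw [hd, pvRuns_cons]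
        simp only [List.length_nil, Nat.cast_zero, add_zero, List.append_assoc, List.cons_append,
          List.nil_append]
        ring_nf

theorem pvB_eq_runs (xs : List Int) : find_slice_ids_alt xs = pvRuns xs 0 := by
  cases xs with
  | nil => simp [find_slice_ids_alt, PySem.List.enumerate_nil, pvRuns_nil]
  | cons x xs =>
      show (let st := (PySem.List.enumerate (x :: xs) 0).foldl pvFB ([], 0, none)
            if (x :: xs) ≠ [] then st.1 ++ [(st.2.1, (((x :: xs).length : Nat) : Int))] else st.1) = _
      rw [PySem.List.enumerate_cons]
      simp only [List.foldl_cons]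
      have hstep : pvFB ([], 0, none) (0, x) = ([], 0, some x) := by simp [pvFB]
      rw [hstep]
      have h01 : (0 : Int) + 1 = 1 := by norm_num
      rw [h01]
      have hrec := pvFB_foldl xs x 1 [] 0 (by omega)
      simp only at hrec
      simp only [ne_eq, reduceCtorEq, not_false_eq_true, if_true, List.length_cons]
      rw [show ((xs.length + 1 : Nat) : Int) = 1 + (xs.length : Int) by push_cast; ring, hrec]
      rw [pvRuns_cons]
      simp only [List.nil_append, zero_add]

-- ===== VERDICT (by name: the statement is the Claim_ definition above) =====
theorem find_slice_ids_spec : Claim_equal_find_slice_ids := by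
  intro xs _
  show find_slice_ids xs = find_slice_ids_alt xs
  rw [pvA_eq_runs, pvB_eq_runs]
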